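-- pv_equiv track=rewrite | github.com/arjunthilak05/Final_Script | app/agents/station_07_reality_check.py | _has_repeated_templates
-- ===== SOURCE A (Python) =====
-- def _has_repeated_templates(text: str) -> bool:
--     """Check for repeated template phrases"""
--
--     sentences = text.split('.')
--     sentence_counts = {}
--
--     for sentence in sentences:
--         cleaned = sentence.strip().lower()
--         if len(cleaned) > 20:  # Only check substantial sentences
--             sentence_counts[cleaned] = sentence_counts.get(cleaned, 0) + 1
--
--     # If any sentence appears more than twice, it's likely templated
--     return any(count > 2 for count in sentence_counts.values())
-- ===== SOURCE B (Python) =====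
-- def _has_repeated_templates(text: str) -> bool:
--     """Check for repeated template phrases (sort-then-scan-runs strategy)"""
--     cleaned = sorted(c for c in (s.strip().lower() for s in text.split('.'))
--                      if len(c) > 20)
--     prev = None
--     run = 0
--     for c in cleaned:
--         if c == prev:
--             run += 1
--         else:
--             prev = c
--             run = 1
--         if run >= 3:
--             return True
--     return False
-- ===== Notes on version B (the rewrite author's own statement) =====
-- stated objective: alternative
-- what changed: The dict frequency table is replaced by sorting the filtered cleaned sentences and scanning once for a run of length 3, with early exit.
import Mathlib
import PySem

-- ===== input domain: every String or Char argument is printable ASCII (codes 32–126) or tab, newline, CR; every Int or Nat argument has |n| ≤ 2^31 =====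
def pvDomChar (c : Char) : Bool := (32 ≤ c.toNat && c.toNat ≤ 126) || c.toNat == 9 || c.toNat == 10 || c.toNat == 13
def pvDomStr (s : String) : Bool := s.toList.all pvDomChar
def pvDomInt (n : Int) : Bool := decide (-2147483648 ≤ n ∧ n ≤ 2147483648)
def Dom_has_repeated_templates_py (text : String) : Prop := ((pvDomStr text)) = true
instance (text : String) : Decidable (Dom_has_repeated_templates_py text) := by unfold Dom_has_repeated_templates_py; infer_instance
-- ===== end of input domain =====

-- B replaces A's dict frequency table by sorting the filtered cleaned sentences and scanning
-- once for a run of length 3 (alternative decomposition; same return value, no side effects).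

-- ===== PORT A =====
-- literal transliteration of A: split, loop building a dict of counts, then any(count > 2)
def has_repeated_templates_py (text : String) : Bool :=
  let sentences : List String := (PySem.Str.split? text ".").getD []   -- sep "." ≠ "" so split? is always some
  let sentence_counts : PySem.Dict String Int :=
    sentences.foldl
      (fun d sentence =>
        let cleaned := PySem.Str.lower (PySem.Str.strip sentence)
        if 20 < PySem.Str.len cleaned then d.insert cleaned (d.getD cleaned 0 + 1) else d)
      PySem.Dict.empty
  sentence_counts.values.any (fun count => decide (2 < count))

-- ===== PORT B =====
-- B-side helper: one pass over the sorted list keeping the previous value and the run length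
def pvRunScan : Option String → Nat → List String → Bool
  | _, _, [] => false
  | prev, run, c :: rest =>
    let run' := if some c == prev then run + 1 else 1
    if 3 ≤ run' then true else pvRunScan (some c) run' rest

def has_repeated_templates_py_alt (text : String) : Bool :=
  let cleaned : List String :=
    PySem.List.sorted
      ((((PySem.Str.split? text ".").getD []).map
          (fun s => PySem.Str.lower (PySem.Str.strip s))).filter
        (fun c => decide (20 < PySem.Str.len c)))
      (fun x => x) false
  pvRunScan none 0 cleaned

-- ===== PRECONDITION & SPEC =====
def Spec_has_repeated_templates_py (text : String) (out : Bool) : Prop := out = has_repeated_templates_py_alt text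
instance (text : String) (out : Bool) : Decidable (Spec_has_repeated_templates_py text out) := by unfold Spec_has_repeated_templates_py; infer_instance

-- ===== CLAIM (what is proved, stated in full; the proofs are below) =====
def Claim_equal_has_repeated_templates_py : Prop := ∀ (text : String), Dom_has_repeated_templates_py text → Spec_has_repeated_templates_py text (has_repeated_templates_py text)

-- ===== LEMMAS AND PROOFS =====

-- A's conditional counting loop over the raw sentences is the plain counting loop over the
-- cleaned-and-filtered list
theorem pv_foldA_fuse (ss : List String) (d : PySem.Dict String Int) :
    ss.foldl
      (fun d sentence =>
        let cleaned := PySem.Str.lower (PySem.Str.strip sentence)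
        if 20 < PySem.Str.len cleaned then d.insert cleaned (d.getD cleaned 0 + 1) else d)
      d
    = ((ss.map (fun s => PySem.Str.lower (PySem.Str.strip s))).filter
        (fun c => decide (20 < PySem.Str.len c))).foldl
        (fun d c => d.insert c (d.getD c 0 + 1)) d := by
  induction ss generalizing d with
  | nil => simp only [List.map_nil, List.filter_nil, List.foldl_nil]
  | cons s t ih =>
    simp only [List.foldl_cons, List.map_cons, List.filter_cons]
    by_cases h : 20 < PySem.Str.len (PySem.Str.lower (PySem.Str.strip s))
    · rw [if_pos h, if_pos (decide_eq_true h), List.foldl_cons]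
      exact ih _
    · rw [if_neg h, if_neg (by simpa using h)]
      exact ih _

-- A's whole loop (over the raw sentences) builds exactly Counter(filtered list)
theorem pv_foldA_counter (ss : List String) :
    ss.foldl
      (fun d sentence =>
        let cleaned := PySem.Str.lower (PySem.Str.strip sentence)
        if 20 < PySem.Str.len cleaned then d.insert cleaned (d.getD cleaned 0 + 1) else d)
      PySem.Dict.empty
    = PySem.Dict.counter
        ((ss.map (fun s => PySem.Str.lower (PySem.Str.strip s))).filter
          (fun c => decide (20 < PySem.Str.len c))) :=
  (pv_foldA_fuse ss PySem.Dict.empty).trans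
    (PySem.Dict.foldl_insert_getD_add_one_eq_counter _)

-- A returns true iff some element of the filtered list occurs more than twice in it
theorem pv_A_iff (fl : List String) :
    ((PySem.Dict.counter fl).values.any (fun count => decide (2 < count)) = true)
    ↔ ∃ v ∈ fl, 2 < fl.count v := by
  have hv : (PySem.Dict.counter fl).values
      = ((PySem.Set.ofList fl).map (fun k => (k, (fl.count k : Int)))).map Prod.snd := by
    simp only [PySem.Dict.values, PySem.Dict.items_counter]
  rw [hv, List.map_map, List.any_map, List.any_eq_true]
  simp only [Function.comp]
  constructor
  · rintro ⟨k, hk, h⟩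
    refine ⟨k, (PySem.Set.mem_ofList _ _).1 hk, ?_⟩
    have h' := of_decide_eq_true h
    exact_mod_cast h'
  · rintro ⟨v, hv', h⟩
    refine ⟨v, (PySem.Set.mem_ofList _ _).2 hv', decide_eq_true ?_⟩
    exact_mod_cast h

-- the run scanner on a sorted tail: true iff the pending run reaches 3 or some later value occurs
-- at least 3 times
theorem pv_scan_iff (l : List String) (hs : l.Pairwise (· ≤ ·)) :
    ∀ (p : String) (r : Nat), r ≤ 2 → (∀ x ∈ l, p ≤ x) →
      (pvRunScan (some p) r l = true ↔
        3 ≤ r + l.count p ∨ ∃ v ∈ l, v ≠ p ∧ 3 ≤ l.count v) := by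
  induction l with
  | nil => intro p r hr _; simp [pvRunScan]; omega
  | cons c t ih =>
    intro p r hr hge
    have hct : ∀ x ∈ t, c ≤ x := fun x hx => (List.pairwise_cons.1 hs).1 x hx
    have hst : t.Pairwise (· ≤ ·) := (List.pairwise_cons.1 hs).2
    by_cases hcp : c = p
    · subst hcp
      have e1 : pvRunScan (some c) r (c :: t)
          = if 3 ≤ r + 1 then true else pvRunScan (some c) (r + 1) t := by
        simp [pvRunScan]
      rw [e1]
      by_cases h3 : 3 ≤ r + 1
      · rw [if_pos h3]
        simp only [List.count_cons_self]
        constructor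
        · intro _; left; omega
        · intro _; trivial
      · rw [if_neg h3, ih hst c (r + 1) (by omega) hct]
        simp only [List.count_cons_self]
        constructor
        · rintro (h | ⟨v, hv, hne, hc⟩)
          · left; omega
          · right; exact ⟨v, List.mem_cons_of_mem _ hv, hne,
              by rwa [List.count_cons_of_ne (Ne.symm hne)]⟩
        · rintro (h | ⟨v, hv, hne, hc⟩)
          · left; omega
          · right
            rcases List.mem_cons.1 hv with h' | h'
            · exact absurd h' hne
            · exact ⟨v, h', hne, by rwa [List.count_cons_of_ne (Ne.symm hne)] at hc⟩
    · have hlt : p < c := lt_of_le_of_ne (hge c List.mem_cons_self) (Ne.symm hcp)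
      have hbeq : (some c == some p) = false := by simp [hcp]
      have e2 : pvRunScan (some p) r (c :: t) = pvRunScan (some c) 1 t := by
        simp [pvRunScan, hbeq]
      rw [e2, ih hst c 1 (by omega) hct]
      have hpcount : (c :: t).count p = 0 := by
        rw [List.count_eq_zero]
        intro hmem
        rcases List.mem_cons.1 hmem with h' | h'
        · exact hcp h'.symm
        · exact absurd (hct p h') (not_le.2 hlt)
      constructor
      · rintro (h | ⟨v, hv, hne, hc⟩)
        · exact Or.inr ⟨c, List.mem_cons_self, ne_of_gt hlt,
            by rw [List.count_cons_self]; omega⟩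
        · have hvp : v ≠ p := fun he =>
            absurd (hct v hv) (by rw [he]; exact not_le.2 hlt)
          refine Or.inr ⟨v, List.mem_cons_of_mem _ hv, hvp, ?_⟩
          rwa [List.count_cons_of_ne (Ne.symm hne)]
      · rintro (h | ⟨v, hv, hvp, hc⟩)
        · rw [hpcount] at h; omega
        · rcases List.mem_cons.1 hv with h' | h'
          · subst h'
            left; rw [List.count_cons_self] at hc; omega
          · by_cases hvc : v = c
            · subst hvc; left; rw [List.count_cons_self] at hc; omega
            · right
              exact ⟨v, h', hvc, by rwa [List.count_cons_of_ne (Ne.symm hvc)] at hc⟩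

-- B returns true iff some element of the filtered list occurs more than twice in it
theorem pv_B_iff (fl : List String) :
    (pvRunScan none 0 (PySem.List.sorted fl (fun x => x) false) = true
      ↔ ∃ v ∈ fl, 2 < fl.count v) := by
  set sl := PySem.List.sorted fl (fun x => x) false with hsl
  have hperm : sl.Perm fl := PySem.List.sorted_perm fl (fun x => x) false
  have hpair : sl.Pairwise (· ≤ ·) := by
    have := PySem.List.sorted_pairwise fl (fun x => x)
    simpa [hsl] using this
  have hmain : (pvRunScan none 0 sl = true ↔ ∃ v ∈ sl, 3 ≤ sl.count v) := by
    cases hsl' : sl with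
    | nil => simp [pvRunScan]
    | cons c t =>
      have hpair' : (c :: t).Pairwise (· ≤ ·) := hsl' ▸ hpair
      have hct : ∀ x ∈ t, c ≤ x := fun x hx => (List.pairwise_cons.1 hpair').1 x hx
      have hst : t.Pairwise (· ≤ ·) := (List.pairwise_cons.1 hpair').2
      have h0 : pvRunScan none 0 (c :: t) = pvRunScan (some c) 1 t := by
        simp [pvRunScan]
      rw [h0, pv_scan_iff t hst c 1 (by omega) hct]
      constructor
      · rintro (h | ⟨v, hv, hne, hc⟩)
        · exact ⟨c, List.mem_cons_self, by rw [List.count_cons_self]; omega⟩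
        · exact ⟨v, List.mem_cons_of_mem _ hv, by rwa [List.count_cons_of_ne (Ne.symm hne)]⟩
      · rintro ⟨v, hv, hc⟩
        rcases List.mem_cons.1 hv with h' | h'
        · subst h'; left; rw [List.count_cons_self] at hc; omega
        · by_cases hvc : v = c
          · subst hvc; left; rw [List.count_cons_self] at hc; omega
          · right
            exact ⟨v, h', hvc, by rwa [List.count_cons_of_ne (Ne.symm hvc)] at hc⟩
  rw [hmain]
  constructor
  · rintro ⟨v, hv, hc⟩
    exact ⟨v, hperm.mem_iff.1 hv, by rw [← hperm.count_eq]; omega⟩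
  · rintro ⟨v, hv, hc⟩
    exact ⟨v, hperm.mem_iff.2 hv, by rw [hperm.count_eq]; omega⟩

-- ===== VERDICT (by name: the statement is the Claim_ definition above) =====
theorem has_repeated_templates_py_spec : Claim_equal_has_repeated_templates_py := by
  intro text _
  show has_repeated_templates_py text = has_repeated_templates_py_alt text
  have e1 : has_repeated_templates_py text
      = ((PySem.Dict.counter
            (((((PySem.Str.split? text ".").getD []).map
                (fun s => PySem.Str.lower (PySem.Str.strip s))).filter
              (fun c => decide (20 < PySem.Str.len c))))).values.any
          (fun count => decide (2 < count))) :=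
    congrArg (fun d : PySem.Dict String Int => d.values.any (fun count => decide (2 < count)))
      (pv_foldA_counter ((PySem.Str.split? text ".").getD []))
  have e2 : has_repeated_templates_py_alt text
      = pvRunScan none 0
          (PySem.List.sorted
            (((((PySem.Str.split? text ".").getD []).map
                (fun s => PySem.Str.lower (PySem.Str.strip s))).filter
              (fun c => decide (20 < PySem.Str.len c)))) (fun x => x) false) := rfl
  rw [e1, e2, Bool.eq_iff_iff, pv_A_iff, pv_B_iff]
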